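-- pv_equiv track=rewrite | github.com/Uberariy/PRAC-Okonishnikov | 5th_semester/lect_ml_2/functions.py | max_after_zero
-- ===== SOURCE A (Python) =====
-- from typing import List
--
-- def max_after_zero(x: List[int]) -> int:
--     a = x
--     s = []
--     while True:
--         if 0 in a and a.index(0)+1 < len(a):
--             s += [a[a.index(0)+1]]
--             a = a[a.index(0)+1:len(a)]
--         elif s == []:
--             return -1
--         else:
--             return max(s)
-- ===== SOURCE B (Python) =====
-- from typing import List
--
-- def max_after_zero(x: List[int]) -> int:
--     s = [b for a, b in zip(x, x[1:]) if a == 0]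
--     return max(s) if s else -1
-- ===== Notes on version B (the rewrite author's own statement) =====
-- stated objective: simpler
-- what changed: Replaces the repeated 0-in/index/slice scanning while-loop with a single zip comprehension collecting every element that follows a zero, then one max.
import Mathlib
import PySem

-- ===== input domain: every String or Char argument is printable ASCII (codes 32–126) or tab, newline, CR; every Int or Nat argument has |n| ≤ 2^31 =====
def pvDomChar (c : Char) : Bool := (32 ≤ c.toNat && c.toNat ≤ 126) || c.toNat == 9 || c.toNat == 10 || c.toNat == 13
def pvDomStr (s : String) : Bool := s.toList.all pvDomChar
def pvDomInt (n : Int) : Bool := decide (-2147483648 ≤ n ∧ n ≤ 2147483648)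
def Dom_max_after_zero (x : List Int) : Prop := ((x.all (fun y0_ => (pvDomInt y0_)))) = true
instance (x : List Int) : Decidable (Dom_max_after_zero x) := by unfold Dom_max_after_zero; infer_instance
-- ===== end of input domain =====

-- B replaces A's repeated `0 in a` / `a.index(0)` / slicing while-loop with one
-- zip comprehension collecting the elements that follow a zero, then a single max (simpler).

-- ===== PORT A =====
-- while True: if 0 in a and a.index(0)+1 < len(a): s += [a[a.index(0)+1]]; a = a[a.index(0)+1:len(a)]
--             elif s == []: return -1  else: return max(s)
def maxAfterZeroLoop (a : List Int) (s : List Int) : Int :=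
  match h : PySem.List.index? a 0 with
  | some i =>
      if hlt : i + 1 < a.length then
        maxAfterZeroLoop (PySem.List.slice a (some ((i : Int) + 1)) (some (a.length : Int)))
          (s ++ [(PySem.List.pyGet? a ((i : Int) + 1)).getD 0])
      else if s = [] then -1 else (PySem.List.max? s (fun y => y)).getD 0
  | none =>
      if s = [] then -1 else (PySem.List.max? s (fun y => y)).getD 0
termination_by a.length
decreasing_by
  rw [PySem.List.slice_of_nonneg a (by omega) (by omega) (by omega) (by omega)]
  have h1 : ((i : Int) + 1).toNat = i + 1 := by omega
  simp [h1]
  omega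

def max_after_zero (x : List Int) : Int := maxAfterZeroLoop x []

-- ===== PORT B =====
-- s = [b for a, b in zip(x, x[1:]) if a == 0]; return max(s) if s else -1
def max_after_zero_alt (x : List Int) : Int :=
  let s := (x.zip x.tail).filterMap (fun p => if p.1 = 0 then some p.2 else none)
  if s = [] then -1 else (PySem.List.max? s (fun y => y)).getD 0

-- ===== PRECONDITION & SPEC =====
def Spec_max_after_zero (x : List Int) (out : Int) : Prop := out = max_after_zero_alt x
instance (x : List Int) (out : Int) : Decidable (Spec_max_after_zero x out) := by unfold Spec_max_after_zero; infer_instance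

-- ===== CLAIM (what is proved, stated in full; the proofs are below) =====
def Claim_equal_max_after_zero : Prop := ∀ (x : List Int), Dom_max_after_zero x → Spec_max_after_zero x (max_after_zero x)

-- ===== LEMMAS AND PROOFS =====

/-- The list of elements that immediately follow a zero (B's comprehension). -/
def followers (l : List Int) : List Int :=
  (l.zip l.tail).filterMap (fun p => if p.1 = 0 then some p.2 else none)

theorem followers_nil : followers [] = [] := rfl

theorem followers_single (x : Int) : followers [x] = [] := rfl

theorem followers_cons_cons (x y : Int) (t : List Int) :
    followers (x :: y :: t) =
      (if x = 0 then y :: followers (y :: t) else followers (y :: t)) := by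
  by_cases hx : x = 0 <;> simp [followers, hx]

/-- A zero-free prefix contributes nothing. -/
theorem followers_append_of_not_mem (pre rest : List Int) (h : (0:Int) ∉ pre) :
    followers (pre ++ rest) = followers rest := by
  induction pre with
  | nil => simp
  | cons p pre' ih =>
      have hp : p ≠ 0 := fun hpe => h (by simp [hpe])
      have h' : (0:Int) ∉ pre' := fun hm => h (by simp [hm])
      cases hpr : pre' ++ rest with
      | nil =>
          rcases List.append_eq_nil_iff.mp hpr with ⟨hp', hr⟩
          subst hp' hr
          simp [followers_single, followers_nil]
      | cons q t =>
          calc followers (p :: pre' ++ rest) = followers (p :: q :: t) := by rw [List.cons_append, hpr]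
            _ = followers (q :: t) := by rw [followers_cons_cons]; simp [hp]
            _ = followers (pre' ++ rest) := by rw [hpr]
            _ = followers rest := ih h'

theorem followers_eq_nil_of_not_mem (l : List Int) (h : (0:Int) ∉ l) :
    followers l = [] := by
  simpa using followers_append_of_not_mem l [] h

/-- Shared return expression of A's elif/else branches. -/
def finish (s : List Int) : Int :=
  if s = [] then -1 else (PySem.List.max? s (fun y => y)).getD 0

theorem loop_eq_finish (n : ℕ) (a s : List Int) (hn : a.length ≤ n) :
    maxAfterZeroLoop a s = finish (s ++ followers a) := by
  induction n generalizing a s with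
  | zero =>
      have ha : a = [] := by
        cases a with
        | nil => rfl
        | cons _ _ => simp at hn
      subst ha
      simp [maxAfterZeroLoop, finish, followers_nil]
  | succ n ih =>
      rw [maxAfterZeroLoop]
      cases h : PySem.List.index? a 0 with
      | none =>
          have h0 : (0:Int) ∉ a := (PySem.List.index?_eq_none_iff a 0).mp h
          simp [finish, followers_eq_nil_of_not_mem a h0]
      | some i =>
          rcases (PySem.List.index?_eq_some_iff a 0 i).mp h with ⟨pre, suf, hae, hlen, hnm⟩
          by_cases hlt : i + 1 < a.length
          · simp only [hlt, dif_pos]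
            -- identify the slice and the indexed element
            have hslice : PySem.List.slice a (some ((i : Int) + 1)) (some (a.length : Int)) = suf := by
              rw [PySem.List.slice_of_nonneg a (by omega) (by omega) (by omega) (by omega)]
              have h1 : ((i : Int) + 1).toNat = i + 1 := by omega
              have h2 : ((a.length : Int)).toNat = a.length := by omega
              rw [h1, h2]
              have hd : a.drop (i + 1) = suf := by
                subst hae
                have : i + 1 = pre.length + 1 := by omega
                rw [this]
                simp
              rw [hd]
              apply List.take_of_length_le
              have : a.length = pre.length + 1 + suf.length := by subst hae; simp; omega
              omega
            have hsuf_ne : suf ≠ [] := by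
              intro hs
              subst hae hs hlen
              simp at hlt
            obtain ⟨y, t, hyt⟩ := List.exists_cons_of_ne_nil hsuf_ne
            have hget : (PySem.List.pyGet? a ((i : Int) + 1)).getD 0 = y := by
              subst hae hlen hyt
              rw [show ((pre.length : Int) + 1) = ((pre.length : Int) + (1 : ℕ)) from by push_cast; ring]
              rw [PySem.List.pyGet?_append_right]
              simp
            rw [hslice, hget, ih suf _ (by subst hae; simp at hn ⊢; omega)]
            -- followers a = y :: followers suf
            have hfa : followers a = y :: followers suf := by
              subst hae hyt
              rw [followers_append_of_not_mem pre _ hnm, followers_cons_cons]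
              simp
            rw [hfa]
            simp
          · simp only [hlt, dif_neg, not_false_iff]
            -- i is the index of the last element: no follower
            have hsuf : suf = [] := by
              cases hs : suf with
              | nil => rfl
              | cons y t =>
                  exfalso
                  apply hlt
                  subst hae hlen hs
                  simp
            have hfa : followers a = [] := by
              subst hae hsuf
              rw [followers_append_of_not_mem pre _ hnm]
              rfl
            simp [finish, hfa]

-- ===== VERDICT (by name: the statement is the Claim_ definition above) =====
theorem max_after_zero_spec : Claim_equal_max_after_zero := by
  intro x _
  unfold Spec_max_after_zero max_after_zero max_after_zero_alt
  rw [loop_eq_finish x.length x [] le_rfl]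
  simp [finish, followers]
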